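-- pv_equiv track=rewrite | github.com/CSSLab/maia-chess | move_prediction/maia_chess_backend/fen_to_vec.py | preproc_to_fen
-- ===== SOURCE A (Python) =====
-- eSubss = [('E' * i, str(i)) for i in range(8,0, -1)]
--
-- castling_vals = 'KQkq'
--
-- def preproc_to_fen(boardStr, is_white, castling):
--     rows = [boardStr[(i*8):(i*8)+8] for i in range(8)]
--
--     if not is_white:
--         castling = castling[2:] + castling[:2]
--         new_rows = []
--         for b in rows:
--             new_rows.append(b.swapcase()[::-1].replace('e', 'E'))
--
--         rows = reversed(new_rows)
--     row_strs = []
--     for r in rows: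
--         for es, i in eSubss:
--             if es in r:
--                 r = r.replace(es, i)
--         row_strs.append(r)
--     castle_str = ''
--     for i, v in enumerate(castling):
--         if v:
--             castle_str += castling_vals[i]
--     if len(castle_str) < 1:
--         castle_str = '-'
--
--     is_white_str = 'w' if is_white else 'b'
--     board_str = '/'.join(row_strs)
--     return f"{board_str} {is_white_str} {castle_str} - 0 1"
-- ===== SOURCE B (Python) =====
-- # Run-length encode each row in one left-to-right pass instead of the descending replace chain.
-- castling_vals = 'KQkq'
--
--
-- def _swap_reverse(row):
--     return row.swapcase()[::-1].replace('e', 'E')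
--
--
-- def _compress(row, run=0):
--     if not row:
--         return str(run) if run else ''
--     c, rest = row[0], row[1:]
--     if c == 'E':
--         return _compress(rest, run + 1)
--     return (str(run) if run else '') + c + _compress(rest, 0)
--
--
-- def preproc_to_fen(boardStr, is_white, castling):
--     rows = [boardStr[i * 8:i * 8 + 8] for i in range(8)]
--     if not is_white:
--         castling = castling[2:] + castling[:2]
--         rows = [_swap_reverse(r) for r in reversed(rows)]
--     board = '/'.join(_compress(r) for r in rows)
--     castle = ''.join(c for c, v in zip(castling_vals, castling) if v) or '-'
--     side = 'w' if is_white else 'b'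
--     return f"{board} {side} {castle} - 0 1"
-- ===== Notes on version B (the rewrite author's own statement) =====
-- stated objective: alternative
-- what changed: Each row's empty-square compression is done in one left-to-right pass with a running count of consecutive 'E's (and the castling string is built by zipping 'KQkq' with the flags) instead of A's chain of eight descending 'EE...E'->digit replace passes per row and indexed castling lookup.
import Mathlib
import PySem

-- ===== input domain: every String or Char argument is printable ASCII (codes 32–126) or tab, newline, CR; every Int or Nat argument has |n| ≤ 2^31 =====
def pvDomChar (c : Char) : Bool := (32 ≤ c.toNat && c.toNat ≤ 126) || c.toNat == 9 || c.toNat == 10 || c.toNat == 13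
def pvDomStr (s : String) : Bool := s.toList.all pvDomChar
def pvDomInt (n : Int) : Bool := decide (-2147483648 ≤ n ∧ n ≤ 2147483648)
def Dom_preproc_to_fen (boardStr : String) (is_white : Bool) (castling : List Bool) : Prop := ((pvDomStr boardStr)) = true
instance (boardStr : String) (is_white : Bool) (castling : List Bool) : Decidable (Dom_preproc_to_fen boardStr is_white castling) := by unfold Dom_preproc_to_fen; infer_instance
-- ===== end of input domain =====

-- B replaces A's per-row chain of eight descending 'EE…E'→digit replaces by a single
-- left-to-right run-length pass (and builds the castling string by zip instead of
-- indexed lookup); equivalence of the return values is proved on Pre_ below.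

-- ===== PORT A =====
-- shared helper: Python str.swapcase, ported character-wise (exact on the ASCII domain Dom gives)
def pvSwapChar (c : Char) : Char :=
  if PySem.Chars.isupper c then PySem.Chars.lowerChar c
  else if PySem.Chars.islower c then PySem.Chars.upperChar c
  else c

-- eSubss = [('E' * i, str(i)) for i in range(8, 0, -1)]
def eSubss : List (List Char × List Char) :=
  (PySem.List.pyRange 8 0 (-1)).map (fun i => (List.replicate i.toNat 'E', PySem.Int.toChars i))

-- castling_vals = 'KQkq'
def castling_vals : List Char := ['K', 'Q', 'k', 'q']

def preproc_to_fen (boardStr : String) (is_white : Bool) (castling : List Bool) : String :=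
  let bs := boardStr.toList
  let rows := (PySem.List.pyRange 0 8 1).map
    (fun i => PySem.List.slice bs (some (i * 8)) (some (i * 8 + 8)))
  let castling := if is_white then castling
    else PySem.List.slice castling (some 2) none ++ PySem.List.slice castling none (some 2)
  let rows := if is_white then rows
    else (rows.foldl (fun acc b =>
      acc ++ [PySem.Chars.replace
        ((PySem.List.slice? (b.map pvSwapChar) none none (-1)).getD []) ['e'] ['E']]) []).reverse
  let row_strs := rows.foldl (fun acc r =>
    acc ++ [eSubss.foldl
      (fun r p => if PySem.Chars.isIn p.1 r then PySem.Chars.replace r p.1 p.2 else r) r]) []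
  let castle_str := (PySem.List.enumerate castling 0).foldl
    (fun acc p => if p.2 then acc ++ [PySem.List.pyGetD castling_vals p.1 ' '] else acc) []
  let castle_str := if castle_str.length < 1 then ['-'] else castle_str
  let is_white_str := if is_white then ['w'] else ['b']
  let board_str := PySem.Chars.join ['/'] row_strs
  String.ofList (board_str ++ [' '] ++ is_white_str ++ [' '] ++ castle_str ++ [' ', '-', ' ', '0', ' ', '1'])

-- ===== PORT B =====
-- _swap_reverse of Source B
def pvSwapReverse (row : List Char) : List Char :=
  PySem.Chars.replace ((PySem.List.slice? (row.map pvSwapChar) none none (-1)).getD []) ['e'] ['E']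

-- _compress of Source B: one pass, counting the run of consecutive 'E's
def pvCompress : List Char → Nat → List Char
  | [], run => if run > 0 then PySem.Int.toChars (run : Int) else []
  | c :: rest, run =>
    if c = 'E' then pvCompress rest (run + 1)
    else (if run > 0 then PySem.Int.toChars (run : Int) else []) ++ c :: pvCompress rest 0

def preproc_to_fen_alt (boardStr : String) (is_white : Bool) (castling : List Bool) : String :=
  let bs := boardStr.toList
  let rows := (PySem.List.pyRange 0 8 1).map
    (fun i => PySem.List.slice bs (some (i * 8)) (some (i * 8 + 8)))
  let castling := if is_white then castling
    else PySem.List.slice castling (some 2) none ++ PySem.List.slice castling none (some 2)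
  let rows := if is_white then rows else rows.reverse.map pvSwapReverse
  let board := PySem.Chars.join ['/'] (rows.map (fun r => pvCompress r 0))
  let castle := ((castling_vals.zip castling).filter (fun p => p.2)).map (fun p => p.1)
  let castle := if castle = [] then ['-'] else castle
  let side := if is_white then ['w'] else ['b']
  String.ofList (board ++ [' '] ++ side ++ [' '] ++ castle ++ [' ', '-', ' ', '0', ' ', '1'])

-- ===== PRECONDITION & SPEC =====
-- Pre_ excludes exactly the inputs where A raises IndexError: a True in the effective
-- (side-rotated) castling list at an index ≥ 4, where castling_vals[i] is out of range.
def Pre_preproc_to_fen (boardStr : String) (is_white : Bool) (castling : List Bool) : Prop :=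
  (((if is_white then castling else castling.drop 2 ++ castling.take 2).drop 4).all
    (fun b => !b)) = true

instance (boardStr : String) (is_white : Bool) (castling : List Bool) :
    Decidable (Pre_preproc_to_fen boardStr is_white castling) := by
  unfold Pre_preproc_to_fen; infer_instance

def pvWitness_preproc_to_fen : String × Bool × List Bool :=
  ("rnbqkbnrpppppppp", true, [true, false, true, true])

def Spec_preproc_to_fen (boardStr : String) (is_white : Bool) (castling : List Bool)
    (out : String) : Prop := out = preproc_to_fen_alt boardStr is_white castling

instance (boardStr : String) (is_white : Bool) (castling : List Bool) (out : String) :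
    Decidable (Spec_preproc_to_fen boardStr is_white castling out) := by
  unfold Spec_preproc_to_fen; infer_instance

-- ===== CLAIM (what is proved, stated in full; the proofs are below) =====
def Claim_equal_preproc_to_fen : Prop := ∀ (boardStr : String) (is_white : Bool) (castling : List Bool), Dom_preproc_to_fen boardStr is_white castling → Pre_preproc_to_fen boardStr is_white castling → Spec_preproc_to_fen boardStr is_white castling (preproc_to_fen boardStr is_white castling)

-- ===== LEMMAS AND PROOFS =====

def replE (p : Char) (k : Nat) (new : List Char) : List Char → List Char
  | [] => []
  | c :: t =>
    if (List.replicate (k+1) p).isPrefixOf (c :: t) then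
      new ++ replE p k new (List.drop (k+1) (c :: t))
    else c :: replE p k new t
  termination_by l => l.length
  decreasing_by all_goals simp

theorem go_eq (p : Char) (k : Nat) (new : List Char) :
    ∀ (fuel : Nat) (l acc : List Char), l.length ≤ fuel →
      PySem.Chars.replace.go (List.replicate (k+1) p) new fuel l acc
        = acc.reverse ++ replE p k new l := by
  intro fuel
  induction fuel with
  | zero => intro l acc h; interval_cases hl : l.length; · simp_all [PySem.Chars.replace.go, replE, List.eq_nil_of_length_eq_zero hl]
  | succ n ih =>
    intro l acc h
    match l with
    | [] => simp [PySem.Chars.replace.go, replE]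
    | c :: t =>
      rw [PySem.Chars.replace.go]
      by_cases hp : (List.replicate (k+1) p).isPrefixOf (c :: t)
      · rw [if_pos hp, ih _ _ (by simp at h ⊢; omega), replE, if_pos hp]
        simp
      · rw [if_neg hp, ih _ _ (by simp at h ⊢; omega), replE, if_neg hp]
        simp

theorem replace_eq_replE (p : Char) (k : Nat) (new : List Char) (l : List Char) :
    PySem.Chars.replace l (List.replicate (k+1) p) new = replE p k new l := by
  rw [PySem.Chars.replace]
  simp [go_eq p k new l.length l []]

-- unfold lemmas
theorem replE_nil (p k new) : replE p k new [] = [] := by rw [replE]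

theorem replE_cons_neg (p : Char) (k : Nat) (new : List Char) (c : Char) (t : List Char)
    (h : ¬ (List.replicate (k+1) p).isPrefixOf (c :: t)) :
    replE p k new (c :: t) = c :: replE p k new t := by rw [replE, if_neg h]

theorem replE_cons_ne (p : Char) (k : Nat) (new : List Char) (c : Char) (t : List Char)
    (h : c ≠ p) : replE p k new (c :: t) = c :: replE p k new t := by
  apply replE_cons_neg
  intro hp
  rw [List.isPrefixOf_iff_prefix] at hp
  rw [List.replicate_succ] at hp
  exact h (List.cons_prefix_cons.mp hp).1.symm

theorem replE_append_ne (p : Char) (k : Nat) (new xs t : List Char)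
    (h : ∀ c ∈ xs, c ≠ p) : replE p k new (xs ++ t) = xs ++ replE p k new t := by
  induction xs with
  | nil => rfl
  | cons c cs ih =>
    simp only [List.cons_append]
    rw [replE_cons_ne _ _ _ _ _ (h c (by simp)), ih (fun c hc => h c (by simp [hc]))]

theorem replE_match (p : Char) (k : Nat) (new t : List Char) :
    replE p k new (List.replicate (k+1) p ++ t) = new ++ replE p k new t := by
  have hne : List.replicate (k+1) p ++ t ≠ [] := by simp
  match hrep : List.replicate (k+1) p ++ t, hne with
  | c :: t', _ =>
    rw [replE]
    rw [if_pos (by rw [List.isPrefixOf_iff_prefix, ← hrep]; exact List.prefix_append _ _)]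
    congr 1
    rw [← hrep]
    congr 1
    rw [List.drop_append_of_le_length (by simp)]
    simp

-- run of j < pattern length passes through
theorem replE_pass_run (p : Char) (k : Nat) (new t : List Char) (j : Nat) (hj : j ≤ k)
    (ht : ∀ c, t.head? = some c → c ≠ p) :
    replE p k new (List.replicate j p ++ t) = List.replicate j p ++ replE p k new t := by
  induction j generalizing t with
  | zero => simp
  | succ n ih =>
    rw [List.replicate_succ, List.cons_append]
    rw [replE_cons_neg]
    · rw [ih t (by omega) ht]; simp
    · rw [List.isPrefixOf_iff_prefix]
      intro hp
      -- prefix of length k+1 of a string whose leading run of p is < k+1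
      have : ∀ (m i : Nat) (s : List Char), i < m → (∀ c, s.head? = some c → c ≠ p) →
          ¬ (List.replicate m p <+: List.replicate i p ++ s) := by
        intro m
        induction m with
        | zero => omega
        | succ m ihm =>
          intro i s hi hs hpre
          match i with
          | 0 =>
            simp only [List.replicate, List.nil_append] at hpre
            match s, hpre with
            | c :: s', hpre =>
              have := (List.cons_prefix_cons.mp hpre).1
              exact hs c rfl this.symm
          | i+1 =>
            rw [List.replicate_succ, List.replicate_succ, List.cons_append] at hpre
            exact ihm i s (by omega) hs (List.cons_prefix_cons.mp hpre).2
      exact this (k+1) (n+1) t (by omega) ht hp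

theorem replE_of_no_occ (p : Char) (k : Nat) (new : List Char) :
    ∀ l : List Char, (∀ j, ¬ (List.replicate (k+1) p <+: l.drop j)) → replE p k new l = l := by
  intro l
  induction l with
  | nil => intro _; exact replE_nil ..
  | cons c t ih =>
    intro h
    rw [replE_cons_neg _ _ _ _ _ (by rw [List.isPrefixOf_iff_prefix]; exact h 0)]
    rw [ih (fun j => h (j+1))]

-- the chain of replaces, innermost pattern applied first (A's foldl order)
def chainL (ps : List (Nat × List Char)) (r : List Char) : List Char :=
  ps.foldl (fun r q => replE 'E' (q.1 - 1) q.2 r) r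

theorem chainL_append (ps qs : List (Nat × List Char)) (r : List Char) :
    chainL (ps ++ qs) r = chainL qs (chainL ps r) := List.foldl_append ..

theorem chainL_nil_input (ps : List (Nat × List Char)) : chainL ps [] = [] := by
  induction ps with
  | nil => rfl
  | cons q qs ih => simp only [chainL, List.foldl_cons, replE_nil]; exact ih

theorem chainL_append_ne (ps : List (Nat × List Char)) (xs t : List Char)
    (h : ∀ c ∈ xs, c ≠ 'E') : chainL ps (xs ++ t) = xs ++ chainL ps t := by
  induction ps generalizing t with
  | nil => rfl
  | cons q qs ih =>
    simp only [chainL, List.foldl_cons] at *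
    rw [replE_append_ne _ _ _ _ _ h, ih]

theorem chainL_pass_run (ps : List (Nat × List Char)) (j : Nat) (t : List Char)
    (hks : ∀ q ∈ ps, j < q.1) (ht : ∀ c, t.head? = some c → c ≠ 'E') :
    chainL ps (List.replicate j 'E' ++ t) = List.replicate j 'E' ++ chainL ps t := by
  induction ps generalizing t with
  | nil => rfl
  | cons q qs ih =>
    simp only [chainL, List.foldl_cons] at *
    have hq := hks q (by simp)
    rw [replE_pass_run _ _ _ _ _ (by omega) ht]
    match t with
    | [] => rw [replE_nil]; exact ih _ (fun q hq => hks q (List.mem_cons_of_mem _ hq)) ht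
    | c :: t' =>
      rw [replE_cons_ne _ _ _ _ _ (ht c rfl)]
      exact ih _ (fun q hq => hks q (List.mem_cons_of_mem _ hq))
        (fun c' hc' => by simp only [List.head?_cons, Option.some.injEq] at hc'; exact hc' ▸ ht c rfl)

def dsc : Nat → List (Nat × List Char)
  | 0 => []
  | m+1 => (m+1, PySem.Int.toChars (m+1)) :: dsc m

theorem dsc_decomp (m : Nat) : ∀ j ≤ m, ∃ part, dsc m = part ++ dsc j ∧ ∀ q ∈ part, j < q.1 := by
  induction m with
  | zero => intro j hj; exact ⟨[], by simp [Nat.le_zero.mp hj], by simp⟩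
  | succ m ih =>
    intro j hj
    rcases Nat.lt_or_ge j (m+1) with h | h
    · obtain ⟨part, h1, h2⟩ := ih j (by omega)
      exact ⟨(m+1, PySem.Int.toChars (m+1)) :: part, by simp [dsc, h1], by
        intro q hq
        rcases List.mem_cons.mp hq with rfl | hq
        · omega
        · exact h2 q hq⟩
    · have : j = m+1 := by omega
      exact ⟨[], by simp [this], by simp⟩

set_option maxRecDepth 10000 in
theorem E_not_mem_digits (j : Nat) (h1 : 1 ≤ j) (h8 : j ≤ 8) :
    'E' ∉ PySem.Int.toChars (j : Int) := by
  interval_cases j <;> simp only [Nat.cast_one, Nat.cast_ofNat] <;> decide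

theorem digits_ne_E (j : Nat) (h1 : 1 ≤ j) (h8 : j ≤ 8) :
    ∀ c ∈ PySem.Int.toChars (j : Int), c ≠ 'E' :=
  fun c hc he => E_not_mem_digits j h1 h8 (he ▸ hc)

theorem pvCompress_run (t : List Char) (j run : Nat) :
    pvCompress (List.replicate j 'E' ++ t) run = pvCompress t (run + j) := by
  induction j generalizing run with
  | zero => simp
  | succ n ih =>
    rw [List.replicate_succ, List.cons_append]
    show pvCompress ('E' :: (List.replicate n 'E' ++ t)) run = _
    rw [pvCompress, if_pos rfl, ih]
    congr 1
    omega

def leadE (l : List Char) : Nat := (l.takeWhile (· == 'E')).length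

theorem leadE_decomp (l : List Char) :
    l = List.replicate (leadE l) 'E' ++ l.dropWhile (· == 'E') ∧
      (∀ c, (l.dropWhile (· == 'E')).head? = some c → c ≠ 'E') := by
  constructor
  · conv_lhs => rw [← List.takeWhile_append_dropWhile (p := (· == 'E')) (l := l)]
    congr 1
    apply List.eq_replicate_of_mem
    intro b hb
    have := List.mem_takeWhile_imp hb
    simpa using this
  · intro c hc
    have := List.head?_dropWhile_not (· == 'E') l
    rw [hc] at this
    simpa using this

theorem master : ∀ (n : Nat) (r : List Char), r.length ≤ n →
    (∀ i, leadE (List.drop i r) ≤ 8) → chainL (dsc 8) r = pvCompress r 0 := by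
  intro n
  induction n with
  | zero =>
    intro r hn _
    have : r = [] := List.eq_nil_of_length_eq_zero (by omega)
    subst this
    rw [chainL_nil_input]; rfl
  | succ n ih =>
    intro r hn hruns
    obtain ⟨hr, ht⟩ := leadE_decomp r
    set j := leadE r with hj
    set t := r.dropWhile (· == 'E') with htdef
    have hj8 : j ≤ 8 := by have := hruns 0; simpa using this
    obtain ⟨part, hdsc, hpart⟩ := dsc_decomp 8 j hj8
    rw [hdsc, hr, chainL_append, chainL_pass_run part j t (hpart) ht]
    match htt : t with
    | [] =>
      rw [chainL_nil_input]
      match hjj : j with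
      | 0 =>
        simp only [List.replicate, List.append_nil]
        rw [chainL_nil_input]; rfl
      | j'+1 =>
        have hd := digits_ne_E (j'+1) (by omega) (by omega)
        rw [Nat.cast_add, Nat.cast_one] at hd
        have hdsc1 : dsc (j'+1) = (j'+1, PySem.Int.toChars ((j' : Int)+1)) :: dsc j' := by
          simp [dsc]
        rw [hdsc1]
        simp only [chainL, List.foldl_cons, Nat.add_sub_cancel, List.append_nil]
        rw [← List.append_nil (List.replicate (j'+1) 'E'), replE_match, replE_nil,
          List.append_nil]
        show chainL (dsc j') _ = _
        rw [← List.append_nil (PySem.Int.toChars ((j' : Int)+1)),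
          chainL_append_ne _ _ _ hd, chainL_nil_input, List.append_nil]
        rw [pvCompress_run]
        simp [pvCompress]
    | c :: t' =>
      have hc : c ≠ 'E' := ht c rfl
      have hlen : t'.length ≤ n := by
        have := congrArg List.length hr
        simp at this
        omega
      have hruns' : ∀ i, leadE (List.drop i t') ≤ 8 := by
        intro i
        have h3 : leadE (List.drop (j + (i+1)) r) ≤ 8 := hruns _
        rw [hr, List.drop_append] at h3
        simp only [List.length_replicate, List.drop_replicate] at h3
        have e1 : j + (i+1) - j = i+1 := by omega
        have e2 : j - (j+(i+1)) = 0 := by omega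
        rw [e1, e2] at h3
        simpa using h3
      have hIH := ih t' hlen hruns'
      rw [show chainL part (c :: t') = c :: chainL part t' from by
        simpa using chainL_append_ne part [c] t' (by simpa using hc)]
      set Y := chainL part t' with hY
      match hjj : j with
      | 0 =>
        have hpd : part = dsc 8 := by
          have := hdsc
          simp [dsc] at this
          exact this.symm
        simp only [List.replicate, List.nil_append]
        rw [show chainL (dsc 0) (c :: Y) = c :: Y from rfl, hY, hpd, hIH]
        rw [pvCompress]
        simp [hc]
      | j'+1 =>
        have hd := digits_ne_E (j'+1) (by omega) (by omega)
        rw [Nat.cast_add, Nat.cast_one] at hd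
        have hdsc1 : dsc (j'+1) = (j'+1, PySem.Int.toChars ((j' : Int)+1)) :: dsc j' := by
          simp [dsc]
        rw [hdsc1]
        simp only [chainL, List.foldl_cons, Nat.add_sub_cancel]
        rw [replE_match, replE_cons_ne _ _ _ _ _ hc]
        show chainL (dsc j') _ = _
        rw [show PySem.Int.toChars ((j' : Int)+1) ++ c :: replE 'E' j' (PySem.Int.toChars ((j' : Int)+1)) Y
              = (PySem.Int.toChars ((j' : Int)+1) ++ [c]) ++ replE 'E' j' (PySem.Int.toChars ((j' : Int)+1)) Y from by simp]
        rw [chainL_append_ne _ _ _ (by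
          intro x hx
          rcases List.mem_append.mp hx with hx | hx
          · exact hd x hx
          · simpa using (List.mem_singleton.mp hx) ▸ hc)]
        have hstep : chainL (dsc j') (replE 'E' j' (PySem.Int.toChars ((j' : Int)+1)) Y)
            = chainL (dsc (j'+1)) Y := by
          rw [hdsc1]
          simp only [chainL, List.foldl_cons, Nat.add_sub_cancel]
        rw [hstep, hY, ← chainL_append, ← hdsc, hIH]
        rw [pvCompress_run, pvCompress]
        simp [hc]

-- the guarded replace of A's inner loop is replE
theorem step_eq (k : Nat) (hk : 1 ≤ k) (new r : List Char) :
    (if PySem.Chars.isIn (List.replicate k 'E') r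
      then PySem.Chars.replace r (List.replicate k 'E') new else r)
    = replE 'E' (k - 1) new r := by
  have hk1 : k - 1 + 1 = k := by omega
  by_cases h : PySem.Chars.isIn (List.replicate k 'E') r
  · rw [if_pos h, ← hk1, replace_eq_replE, Nat.add_sub_cancel]
  · rw [if_neg h]
    refine (replE_of_no_occ _ _ _ r ?_).symm
    intro i hpre
    have : ∃ i, List.replicate k 'E' <+: List.drop i r := ⟨i, hk1 ▸ hpre⟩
    rw [PySem.Chars.exists_prefix_drop_iff_isIn] at this
    simp [h] at this

set_option maxRecDepth 10000 in
theorem eSubss_lit : eSubss =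
    [(List.replicate 8 'E', ['8']), (List.replicate 7 'E', ['7']), (List.replicate 6 'E', ['6']),
     (List.replicate 5 'E', ['5']), (List.replicate 4 'E', ['4']), (List.replicate 3 'E', ['3']),
     (List.replicate 2 'E', ['2']), (List.replicate 1 'E', ['1'])] := by decide

set_option maxRecDepth 10000 in
theorem dsc_lit : dsc 8 = [(8, ['8']), (7, ['7']), (6, ['6']), (5, ['5']), (4, ['4']),
    (3, ['3']), (2, ['2']), (1, ['1'])] := by decide

theorem chainA_eq (r : List Char) :
    eSubss.foldl (fun r p => if PySem.Chars.isIn p.1 r then PySem.Chars.replace r p.1 p.2 else r) r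
      = chainL (dsc 8) r := by
  rw [eSubss_lit, dsc_lit]
  simp only [chainL, List.foldl_cons, List.foldl_nil]
  rw [step_eq 8 (by omega), step_eq 7 (by omega), step_eq 6 (by omega), step_eq 5 (by omega),
    step_eq 4 (by omega), step_eq 3 (by omega), step_eq 2 (by omega), step_eq 1 (by omega)]

theorem length_replE_single (p d : Char) : ∀ l : List Char, (replE p 0 [d] l).length = l.length := by
  intro l
  induction l with
  | nil => rw [replE_nil]
  | cons c t ih =>
    by_cases h : (List.replicate (0+1) p).isPrefixOf (c :: t)
    · rw [replE, if_pos h]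
      simpa using ih
    · rw [replE_cons_neg _ _ _ _ _ h]
      simpa using ih

theorem length_pvSwapReverse (row : List Char) : (pvSwapReverse row).length = row.length := by
  rw [pvSwapReverse, PySem.List.slice?_none_none_neg_one]
  rw [show (['e'] : List Char) = List.replicate (0+1) 'e' from rfl, replace_eq_replE]
  rw [length_replE_single]
  simp

theorem leadE_le_len (l : List Char) : leadE l ≤ l.length := (l.takeWhile_sublist _).length_le

theorem runs8 (r : List Char) (h : r.length ≤ 8) : ∀ i, leadE (List.drop i r) ≤ 8 := by
  intro i
  calc leadE (List.drop i r) ≤ (List.drop i r).length := leadE_le_len _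
  _ ≤ r.length := by simp
  _ ≤ 8 := h

theorem rows0_len (bs : List Char) :
    ∀ r ∈ (PySem.List.pyRange 0 8 1).map
      (fun i => PySem.List.slice bs (some (i * 8)) (some (i * 8 + 8))), r.length ≤ 8 := by
  intro r hr
  obtain ⟨i, hi, rfl⟩ := List.mem_map.mp hr
  have h0 : (0:Int) ≤ i := (PySem.List.mem_pyRange_one.mp hi).1
  rw [PySem.List.slice_toNat]
  · simp only [List.length_take, List.length_drop]
    omega
  · exact mul_nonneg h0 (by norm_num)
  · exact add_nonneg (mul_nonneg h0 (by norm_num)) (by norm_num)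

-- A's row_strs loop equals B's map of the one-pass compressor
theorem rowstrs_eq (rows2 : List (List Char)) (hlen : ∀ r ∈ rows2, r.length ≤ 8) :
    rows2.foldl (fun acc r =>
      acc ++ [eSubss.foldl
        (fun r p => if PySem.Chars.isIn p.1 r then PySem.Chars.replace r p.1 p.2 else r) r]) []
      = rows2.map (fun r => pvCompress r 0) := by
  rw [PySem.List.foldl_append_singleton_eq_map]
  exact List.map_congr_left (fun r hr =>
    (chainA_eq r).trans (master r.length r le_rfl (runs8 r (hlen r hr))))

-- A's reversed swap-rows loop equals B's map over the reversed rows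
theorem swaprows_eq (rows0 : List (List Char)) :
    (rows0.foldl (fun acc b =>
      acc ++ [PySem.Chars.replace
        ((PySem.List.slice? (b.map pvSwapChar) none none (-1)).getD []) ['e'] ['E']]) []).reverse
      = rows0.reverse.map pvSwapReverse := by
  rw [PySem.List.foldl_append_singleton_eq_map]
  rw [show (fun b => PySem.Chars.replace
      ((PySem.List.slice? (b.map pvSwapChar) none none (-1)).getD []) ['e'] ['E']) = pvSwapReverse
    from rfl]
  exact Eq.symm List.map_reverse

theorem castle_fold_false (vals : List Char) : ∀ (c2 : List Bool) (s : Int) (acc : List Char),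
    c2.all (fun b => !b) = true →
    (PySem.List.enumerate c2 s).foldl
      (fun acc p => if p.2 then acc ++ [PySem.List.pyGetD vals p.1 ' '] else acc) acc = acc := by
  intro c2
  induction c2 with
  | nil => intro s acc _; rfl
  | cons v rest ih =>
    intro s acc h
    rw [List.all_cons, Bool.and_eq_true] at h
    obtain ⟨hv, hrest⟩ := h
    cases v
    · rw [PySem.List.enumerate_cons]
      simp only [List.foldl_cons]
      rw [if_neg (by simp)]
      exact ih (s+1) acc hrest
    · simp at hv

theorem castle_fold_eq (vals : List Char) : ∀ (c2 : List Bool) (s : Nat) (acc : List Char),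
    s ≤ vals.length →
    ((c2.drop (vals.length - s)).all (fun b => !b)) = true →
    (PySem.List.enumerate c2 (s : Int)).foldl
      (fun acc p => if p.2 then acc ++ [PySem.List.pyGetD vals p.1 ' '] else acc) acc
      = acc ++ (((vals.drop s).zip c2).filter (fun p => p.2)).map (fun p => p.1) := by
  intro c2
  induction c2 with
  | nil => intro s acc _ _; simp [List.zip_nil_right]
  | cons v rest ih =>
    intro s acc hs hall
    rcases Nat.lt_or_ge s vals.length with h | h
    · rw [PySem.List.enumerate_cons]
      simp only [List.foldl_cons]
      have hget : PySem.List.pyGetD vals (s : Int) ' ' = vals[s] := by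
        rw [PySem.List.pyGetD_natCast]
        exact List.getD_eq_getElem _ _ h
      have hdrop : vals.drop s = vals[s] :: vals.drop (s+1) := List.drop_eq_getElem_cons h
      have hallr : ((rest.drop (vals.length - (s+1))).all (fun b => !b)) = true := by
        have : vals.length - s = (vals.length - (s+1)) + 1 := by omega
        rw [this] at hall
        simpa using hall
      have hcast : ((s:Int) + 1) = (((s+1 : Nat)) : Int) := by push_cast; ring
      cases v
      · rw [if_neg (by simp), hcast, ih (s+1) acc (by omega) hallr, hdrop,
          List.zip_cons_cons, List.filter_cons]
        simp only [Bool.false_eq_true, if_false]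
      · rw [if_pos (by simp), hcast, ih (s+1) _ (by omega) hallr, hdrop, hget,
          List.zip_cons_cons, List.filter_cons]
        simp
    · have hs' : s = vals.length := by omega
      subst hs'
      rw [Nat.sub_self, List.drop_zero] at hall
      rw [castle_fold_false vals _ _ _ hall]
      rw [List.drop_length]
      simp

theorem iflen_eq (cs : List Char) :
    (if cs.length < 1 then ['-'] else cs) = (if cs = [] then ['-'] else cs) := by
  cases cs <;> simp

theorem main_eq (boardStr : String) (is_white : Bool) (castling : List Bool)
    (hpre : Pre_preproc_to_fen boardStr is_white castling) :
    preproc_to_fen boardStr is_white castling = preproc_to_fen_alt boardStr is_white castling := by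
  unfold Pre_preproc_to_fen at hpre
  cases is_white with
  | true =>
    simp only [preproc_to_fen, preproc_to_fen_alt, if_true] at *
    have hall : (castling.drop (castling_vals.length - 0)).all (fun b => !b) = true := by
      simpa using hpre
    have hc := castle_fold_eq castling_vals castling 0 [] (by norm_num [castling_vals]) hall
    norm_num at hc
    rw [rowstrs_eq _ (rows0_len _), hc, iflen_eq]
  | false =>
    simp only [preproc_to_fen, preproc_to_fen_alt, Bool.false_eq_true, if_false] at *
    have heff : PySem.List.slice castling (some 2) none ++ PySem.List.slice castling none (some 2)
        = castling.drop 2 ++ castling.take 2 := by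
      rw [PySem.List.slice_from, PySem.List.slice_to]
      · rfl
      · norm_num
      · norm_num
    have hall : ((PySem.List.slice castling (some 2) none
        ++ PySem.List.slice castling none (some 2)).drop (castling_vals.length - 0)).all
        (fun b => !b) = true := by
      rw [heff]; simpa using hpre
    have hc := castle_fold_eq castling_vals _ 0 [] (by norm_num [castling_vals]) hall
    norm_num at hc
    rw [swaprows_eq, hc, iflen_eq]
    rw [rowstrs_eq]
    intro r hr
    obtain ⟨b, hb, rfl⟩ := List.mem_map.mp hr
    rw [length_pvSwapReverse]
    exact rows0_len boardStr.toList b (List.mem_reverse.mp hb)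

-- ===== VERDICT (by name: the statement is the Claim_ definition above) =====
theorem preproc_to_fen_spec : Claim_equal_preproc_to_fen := by
  intro boardStr is_white castling _ hpre
  unfold Spec_preproc_to_fen
  exact main_eq boardStr is_white castling hpre
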